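-- pv_equiv track=rewrite | github.com/Gurthas/Practice | leetcode-2019/huiwen.py | hashuiwen
-- ===== SOURCE A (Python) =====
-- def hashuiwen(x):
--     if x < 0 or x % 10 == 0 and x != 0:
--         return False
--     y = 0
--     while x > y:
--         y = x % 10 + y * 10
--         x //= 10
--     return x == y or x == y // 10
-- ===== SOURCE B (Python) =====
-- def hashuiwen(x):
--     if x < 0:
--         return False
--     rev, n = 0, x
--     while n > 0:
--         rev = rev * 10 + n % 10
--         n //= 10
--     return rev == x
-- ===== Notes on version B (the rewrite author's own statement) =====
-- stated objective: simpler
-- what changed: B reverses the whole integer arithmetically and compares it to the untouched original (guarding only negatives), instead of A's half-reversal loop with its data-dependent stopping condition (x > y), its trailing-zero pre-filter and its two-way even/odd-length final comparison.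
import Mathlib
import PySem

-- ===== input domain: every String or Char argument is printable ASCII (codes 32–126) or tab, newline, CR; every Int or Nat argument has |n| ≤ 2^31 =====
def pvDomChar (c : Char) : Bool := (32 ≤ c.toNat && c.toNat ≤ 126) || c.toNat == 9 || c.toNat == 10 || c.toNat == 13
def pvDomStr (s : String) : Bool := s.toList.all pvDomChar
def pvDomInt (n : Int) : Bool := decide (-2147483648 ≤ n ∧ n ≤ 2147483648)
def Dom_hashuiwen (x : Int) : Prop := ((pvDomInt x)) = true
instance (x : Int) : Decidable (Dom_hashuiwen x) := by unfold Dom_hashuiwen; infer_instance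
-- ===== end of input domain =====

-- B reverses the whole integer and compares with the original, instead of A's half-reversal
-- loop; equivalence of the return values is proved for every int.

-- ===== PORT A =====
-- A's while loop; it only runs after 'x < 0' returned False, so the state is a pair of
-- nonnegative integers and Nat's / and % coincide with Python's // and % here (exact).
def hashuiwenLoop (x y : Nat) : Nat × Nat :=
  if y < x then hashuiwenLoop (x / 10) (x % 10 + y * 10) else (x, y)
termination_by x
decreasing_by exact Nat.div_lt_self (by omega) (by omega)

def hashuiwen (x : Int) : Bool :=
  if x < 0 ∨ (PySem.Int.mod x 10 = 0 ∧ x ≠ 0) then false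
  else
    let p := hashuiwenLoop x.toNat 0
    (p.1 == p.2) || (p.1 == p.2 / 10)

-- ===== PORT B =====
-- B's while loop (runs after 'x < 0' returned False; nonnegative state, Nat / % exact).
def revLoop (n rev : Nat) : Nat :=
  if 0 < n then revLoop (n / 10) (rev * 10 + n % 10) else rev
termination_by n
decreasing_by exact Nat.div_lt_self (by omega) (by omega)

def hashuiwen_alt (x : Int) : Bool :=
  if x < 0 then false else revLoop x.toNat 0 == x.toNat

-- ===== PRECONDITION & SPEC =====
def Spec_hashuiwen (x : Int) (out : Bool) : Prop := out = hashuiwen_alt x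
instance (x : Int) (out : Bool) : Decidable (Spec_hashuiwen x out) := by unfold Spec_hashuiwen; infer_instance

-- ===== CLAIM (what is proved, stated in full; the proofs are below) =====
def Claim_equal_hashuiwen : Prop := ∀ (x : Int), Dom_hashuiwen x → Spec_hashuiwen x (hashuiwen x)

-- ===== LEMMAS AND PROOFS =====

-- 10^(number of decimal digits of n), for bounding the reversal loop
def pow10len (n : Nat) : Nat :=
  if 0 < n then 10 * pow10len (n / 10) else 1
termination_by n
decreasing_by exact Nat.div_lt_self (by omega) (by omega)

lemma revLoop_zero (rev : Nat) : revLoop 0 rev = rev := by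
  rw [revLoop]; simp

lemma revLoop_pos (n rev : Nat) (h : 0 < n) :
    revLoop n rev = revLoop (n / 10) (rev * 10 + n % 10) := by
  rw [revLoop]; simp [h]

lemma pow10len_zero : pow10len 0 = 1 := by rw [pow10len]; simp

lemma pow10len_pos_eq (n : Nat) (h : 0 < n) : pow10len n = 10 * pow10len (n / 10) := by
  rw [pow10len]; simp [h]

lemma pow10len_pos (n : Nat) : 0 < pow10len n := by
  induction n using Nat.strong_induction_on with
  | _ n ih =>
    by_cases h : 0 < n
    · rw [pow10len_pos_eq n h]
      have := ih (n / 10) (Nat.div_lt_self h (by omega))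
      omega
    · simp [show n = 0 by omega, pow10len_zero]

lemma pow10len_le (n : Nat) (h : 1 ≤ n) : pow10len n ≤ 10 * n := by
  induction n using Nat.strong_induction_on with
  | _ n ih =>
    rw [pow10len_pos_eq n h]
    by_cases h10 : 10 ≤ n
    · have h1 : 1 ≤ n / 10 := by omega
      have := ih (n / 10) (Nat.div_lt_self h (by omega)) h1
      have : pow10len (n / 10) ≤ n := le_trans this (by omega)
      omega
    · have : n / 10 = 0 := by omega
      rw [this, pow10len_zero]; omega

lemma pow10len_mono (m n : Nat) (h : m ≤ n) : pow10len m ≤ pow10len n := by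
  induction m using Nat.strong_induction_on generalizing n with
  | _ m ih =>
    by_cases hm : 0 < m
    · have hn : 0 < n := by omega
      rw [pow10len_pos_eq m hm, pow10len_pos_eq n hn]
      have := ih (m / 10) (Nat.div_lt_self hm (by omega)) (n / 10) (Nat.div_le_div_right h)
      omega
    · rw [show m = 0 by omega, pow10len_zero]
      exact pow10len_pos n

lemma pow10len_is_pow (n : Nat) : ∃ k, pow10len n = 10 ^ k := by
  induction n using Nat.strong_induction_on with
  | _ n ih =>
    by_cases h : 0 < n
    · obtain ⟨k, hk⟩ := ih (n / 10) (Nat.div_lt_self h (by omega))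
      exact ⟨k + 1, by rw [pow10len_pos_eq n h, hk]; ring⟩
    · exact ⟨0, by simp [show n = 0 by omega, pow10len_zero]⟩

-- the accumulator splits off: revLoop n acc = acc * 10^(len n) + reverse of n
lemma revLoop_split (n : Nat) : ∀ acc, revLoop n acc = acc * pow10len n + revLoop n 0 := by
  induction n using Nat.strong_induction_on with
  | _ n ih =>
    intro acc
    by_cases h : 0 < n
    · have ihn := ih (n / 10) (Nat.div_lt_self h (by omega))
      rw [revLoop_pos n acc h, revLoop_pos n 0 h, ihn (acc * 10 + n % 10),
        ihn (0 * 10 + n % 10), pow10len_pos_eq n h]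
      ring
    · rw [show n = 0 by omega]
      rw [revLoop_zero, revLoop_zero, pow10len_zero]; ring

lemma revLoop_lt (n : Nat) : ∀ acc, revLoop n acc < (acc + 1) * pow10len n := by
  induction n using Nat.strong_induction_on with
  | _ n ih =>
    intro acc
    by_cases h : 0 < n
    · rw [revLoop_pos n acc h, pow10len_pos_eq n h]
      have := ih (n / 10) (Nat.div_lt_self h (by omega)) (acc * 10 + n % 10)
      have hd : n % 10 < 10 := Nat.mod_lt _ (by omega)
      calc revLoop (n / 10) (acc * 10 + n % 10) < (acc * 10 + n % 10 + 1) * pow10len (n / 10) := this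
        _ ≤ (acc * 10 + 10) * pow10len (n / 10) := Nat.mul_le_mul_right _ (by omega)
        _ = (acc + 1) * (10 * pow10len (n / 10)) := by ring
    · rw [show n = 0 by omega, revLoop_zero, pow10len_zero]; omega

lemma revLoop_self_lt (n : Nat) : revLoop n 0 < pow10len n := by
  have := revLoop_lt n 0; simpa using this

-- one swapped step: pushing x's low digit onto y and popping it back are inverse
lemma revLoop_swap_step (x y : Nat) (_hx : 0 < x) (hb : 0 < x % 10 + y * 10) :
    revLoop (x % 10 + y * 10) (x / 10) = revLoop y x := by
  rw [revLoop_pos _ _ hb]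
  have h1 : (x % 10 + y * 10) / 10 = y := by
    rw [Nat.add_mul_div_right _ _ (by omega : (0:Nat) < 10)]
    simp
  have h2 : (x % 10 + y * 10) % 10 = x % 10 := by
    simp [Nat.add_mul_mod_self_right]
  rw [h1, h2]
  congr 1
  omega

-- CRUX: at a reachable exit state of A's loop, "reversal unchanged" is exactly A's test
lemma crux (a y0 d : Nat) (hd : d < 10) (hy : y0 < 10 * a + d) (hab : a ≤ d + y0 * 10) :
    (revLoop a (d + y0 * 10) = revLoop (d + y0 * 10) a ↔
      (a = d + y0 * 10 ∨ a = (d + y0 * 10) / 10)) := by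
  set b := d + y0 * 10 with hbdef
  have hb : 0 < b := by omega
  have hb10 : b / 10 = y0 := by
    rw [hbdef, Nat.add_mul_div_right _ _ (by omega : (0:Nat) < 10), Nat.div_eq_of_lt hd]
    omega
  have hbm : b % 10 = d := by
    rw [hbdef]; simp [Nat.mod_eq_of_lt hd]
  constructor
  · -- the hard direction
    intro hE
    have hPb : pow10len b = 10 * pow10len y0 := by
      rw [pow10len_pos_eq b hb, hb10]
    have hrb : revLoop b 0 = d * pow10len y0 + revLoop y0 0 := by
      rw [revLoop_pos b 0 hb, hb10, hbm, revLoop_split y0 (0 * 10 + d)]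
      ring_nf
    have hEa := hE
    rw [revLoop_split a b, revLoop_split b a] at hEa
    -- hEa : b * pow10len a + revLoop a 0 = a * pow10len b + revLoop b 0
    set Pa := pow10len a with hPa
    set Q := pow10len y0 with hQ
    have hra : revLoop a 0 < Pa := revLoop_self_lt a
    have hry : revLoop y0 0 < Q := revLoop_self_lt y0
    have hPapos : 0 < Pa := pow10len_pos a
    have hQpos : 0 < Q := pow10len_pos y0
    have hPaPb : Pa ≤ 10 * Q := by rw [hPa, hQ, ← hPb]; exact pow10len_mono a b hab
    -- trichotomy on powers of ten
    obtain ⟨i, hi⟩ := pow10len_is_pow a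
    obtain ⟨j, hj⟩ := pow10len_is_pow y0
    have htri : Pa = 10 * Q ∨ Pa = Q ∨ 10 * Pa ≤ Q := by
      rcases Nat.lt_trichotomy i j with h | h | h
      · right; right
        rw [hPa, hQ, hi, hj]
        calc 10 * 10 ^ i = 10 ^ (i + 1) := by ring
          _ ≤ 10 ^ j := Nat.pow_le_pow_right (by omega) (by omega)
      · right; left; rw [hPa, hQ, hi, hj, h]
      · left
        have h1 : 10 * Q ≤ Pa := by
          rw [hPa, hQ, hi, hj]
          calc 10 * 10 ^ j = 10 ^ (j + 1) := by ring
            _ ≤ 10 ^ i := Nat.pow_le_pow_right (by omega) (by omega)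
        omega
    rcases htri with hc | hc | hc
    · -- same number of digits: a = b
      left
      rw [hPb, ← hc] at hEa
      -- b * Pa + ra = a * Pa + rb, rb < Pb = Pa
      have hrbb : revLoop b 0 < Pa := by
        have := revLoop_self_lt b
        rw [hPb, ← hc] at this; exact this
      by_contra hne
      have h1 : a + 1 ≤ b := by omega
      have : (a + 1) * Pa ≤ b * Pa := Nat.mul_le_mul_right _ h1
      nlinarith
    · -- one digit more in b: a = b/10 = y0
      right
      rw [hb10]
      rw [hPb, hrb, ← hc, hbdef] at hEa
      -- (d + y0*10) * Pa + ra = a * (10 * Pa) + d * Pa + ry0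
      by_contra hne
      rcases Nat.lt_or_ge a y0 with h1 | h1
      · have : (a + 1) * (10 * Pa) ≤ y0 * (10 * Pa) := Nat.mul_le_mul_right _ (by omega)
        nlinarith
      · have h2 : y0 + 1 ≤ a := by omega
        have : (y0 + 1) * (10 * Pa) ≤ a * (10 * Pa) := Nat.mul_le_mul_right _ h2
        nlinarith
    · -- b at least two digits longer: impossible at an exit state
      exfalso
      rw [hPb, hrb, hbdef] at hEa
      -- LHS < (y0+1)*Q ≤ (10a+d)*Q ≤ RHS
      have hlt : (d + y0 * 10) * Pa + revLoop a 0 < (y0 + 1) * Q := by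
        calc (d + y0 * 10) * Pa + revLoop a 0 < (d + y0 * 10 + 1) * Pa := by nlinarith
          _ ≤ (y0 + 1) * 10 * Pa := Nat.mul_le_mul_right _ (by omega)
          _ ≤ (y0 + 1) * Q := by
              calc (y0 + 1) * 10 * Pa = (y0 + 1) * (10 * Pa) := by ring
                _ ≤ (y0 + 1) * Q := Nat.mul_le_mul_left _ hc
      have hge : (y0 + 1) * Q ≤ a * (10 * Q) + d * Q + revLoop y0 0 := by
        calc (y0 + 1) * Q ≤ (10 * a + d) * Q := Nat.mul_le_mul_right _ (by omega)
          _ = a * (10 * Q) + d * Q := by ring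
          _ ≤ a * (10 * Q) + d * Q + revLoop y0 0 := by omega
      omega
  · -- easy direction
    intro h
    rcases h with h | h
    · rw [h]
    · rw [hb10] at h
      have hswap : revLoop b a = revLoop a b := by
        rw [revLoop_pos b a hb, hb10, hbm, h]
        congr 1
        omega
      exact hswap.symm

-- A's loop, started under its guard, ends in a one-step-back witness state, and both
-- 'revLoop x y' and the swapped 'revLoop y x' are loop invariants
lemma loopA_exit (x : Nat) : ∀ y, y < x → (0 < y ∨ 0 < x % 10) →
    ∃ x0 y0, y0 < x0 ∧ hashuiwenLoop x y = (x0 / 10, x0 % 10 + y0 * 10) ∧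
      x0 / 10 ≤ x0 % 10 + y0 * 10 ∧
      revLoop (x0 % 10 + y0 * 10) (x0 / 10) = revLoop y x ∧
      revLoop (x0 / 10) (x0 % 10 + y0 * 10) = revLoop x y := by
  induction x using Nat.strong_induction_on with
  | _ x ih =>
    intro y hyx hpos
    have hx : 0 < x := by omega
    have hloop : hashuiwenLoop x y = hashuiwenLoop (x / 10) (x % 10 + y * 10) := by
      rw [hashuiwenLoop]; simp [hyx]
    have hy' : 0 < x % 10 + y * 10 := by omega
    have hfwd : revLoop (x / 10) (x % 10 + y * 10) = revLoop x y := by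
      rw [revLoop_pos x y hx]; congr 1; omega
    have hswp : revLoop (x % 10 + y * 10) (x / 10) = revLoop y x :=
      revLoop_swap_step x y hx hy'
    by_cases hcont : x % 10 + y * 10 < x / 10
    · -- the loop continues
      have hrec := ih (x / 10) (Nat.div_lt_self hx (by omega)) (x % 10 + y * 10) hcont
        (Or.inl hy')
      obtain ⟨x0, y0, h1, h2, h3, h4, h5⟩ := hrec
      exact ⟨x0, y0, h1, by rw [hloop, h2], h3, by rw [h4, hswp], by rw [h5, hfwd]⟩
    · -- the loop exits right after this step: (x, y) is the witness
      refine ⟨x, y, hyx, ?_, by omega, hswp, hfwd⟩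
      rw [hloop, hashuiwenLoop]
      simp [hcont]

-- the reversal of a positive multiple of 10 is strictly smaller than the number
lemma revLoop_mul10_lt (n : Nat) (h10 : 10 ≤ n) (hm : n % 10 = 0) : revLoop n 0 < n := by
  have h1 : revLoop n 0 = revLoop (n / 10) 0 := by
    rw [revLoop_pos n 0 (by omega), hm]
  have h2 : revLoop (n / 10) 0 < pow10len (n / 10) := revLoop_self_lt (n / 10)
  have h3 : pow10len (n / 10) ≤ 10 * (n / 10) := pow10len_le (n / 10) (by omega)
  omega

-- ===== VERDICT (by name: the statement is the Claim_ definition above) =====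
theorem hashuiwen_spec : Claim_equal_hashuiwen := by
  intro x _
  unfold Spec_hashuiwen hashuiwen hashuiwen_alt
  by_cases hneg : x < 0
  · rw [if_pos hneg, if_pos (Or.inl hneg)]
  · rw [if_neg hneg]
    obtain ⟨n, rfl⟩ : ∃ n : ℕ, x = (n : Int) := ⟨x.toNat, by omega⟩
    simp only [Int.toNat_natCast]
    have hmod : PySem.Int.mod (n : Int) 10 = ((n % 10 : Nat) : Int) := by
      exact_mod_cast PySem.Int.mod_natCast n 10
    by_cases hguard : PySem.Int.mod (n : Int) 10 = 0 ∧ (n : Int) ≠ 0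
    · -- multiple of 10, nonzero: A returns False; B's reversal is strictly smaller than n
      rw [if_pos (Or.inr hguard)]
      have hm : n % 10 = 0 := by
        have := hguard.1; rw [hmod] at this; exact_mod_cast this
      have hne : n ≠ 0 := fun h => hguard.2 (by simp [h])
      have hlt := revLoop_mul10_lt n (by omega) hm
      have hx : revLoop n 0 ≠ n := by omega
      simp [hx]
    · rw [if_neg (by tauto)]
      rcases Nat.eq_zero_or_pos n with hz | hz
      · subst hz
        rw [show hashuiwenLoop 0 0 = (0, 0) from by rw [hashuiwenLoop]; simp]
        simp [revLoop_zero]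
      · -- positive, not a multiple of 10
        have hm : 0 < n % 10 := by
          rcases Nat.eq_zero_or_pos (n % 10) with h | h
          · exact absurd ⟨by rw [hmod, h]; rfl, Int.natCast_ne_zero.mpr (by omega)⟩ hguard
          · exact h
        obtain ⟨x0, y0, h1, h2, h3, h4, h5⟩ := loopA_exit n 0 (by omega) (Or.inr hm)
        rw [h2, revLoop_zero] at *
        have hcx := crux (x0 / 10) y0 (x0 % 10) (Nat.mod_lt _ (by omega)) (by omega) h3
        rw [Bool.eq_iff_iff]
        simp only [Bool.or_eq_true, beq_iff_eq]
        constructor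
        · intro hA
          have heq : revLoop (x0 / 10) (x0 % 10 + y0 * 10) = revLoop (x0 % 10 + y0 * 10) (x0 / 10) :=
            hcx.mpr hA
          rw [h5, h4] at heq
          exact heq
        · intro hB
          exact hcx.mp (by rw [h5, h4]; exact hB)
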